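-- pv_equiv track=rewrite | github.com/banshee0716/Leetcode | 2588-count-the-number-of-beautiful-subarrays/2588-count-the-number-of-beautiful-subarrays.py | beautifulSubarrays
-- ===== SOURCE A (Python) =====
-- from typing import List
--
-- def beautifulSubarrays(nums: List[int]) -> int:
--     res = 0
--     n = len(nums)
--     pre_xor = [0] * (n+1)
--     pre_xor[0]=0
--     cnt = [0]*(1<<20)
--     cnt[0] = 1
--
--     for i in range(1,n+1):
--         pre_xor[i] = pre_xor[i-1] ^ nums[i-1]
--         res += cnt[pre_xor[i]]
--         cnt[pre_xor[i]] += 1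
--
--     return res
-- ===== SOURCE B (Python) =====
-- from typing import List
--
-- def beautifulSubarrays(nums: List[int]) -> int:
--     # Phase 1: the full prefix-XOR list, with the leading 0.
--     prefix = [0]
--     for x in nums:
--         prefix.append(prefix[-1] ^ x)
--     # Phase 2: sort it, so equal prefix values become adjacent runs.
--     prefix.sort()
--     # Phase 3: one scan over runs of equal values; a run of length r
--     # contributes r*(r-1)//2 beautiful subarrays (pairs of equal prefixes).
--     total = 0
--     run = 0
--     prev = None
--     for p in prefix:
--         if p == prev:
--             run += 1
--         else:
--             total += run * (run - 1) // 2
--             run = 1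
--             prev = p
--     return total + run * (run - 1) // 2
-- ===== Notes on version B (the rewrite author's own statement) =====
-- stated objective: alternative
-- what changed: Replaces A's one-pass incremental accumulation into a preallocated 2^20 counting array with a sort-based algorithm: build the prefix-XOR list, sort it so equal values become adjacent, then one run-length scan summing r*(r-1)//2 per run; comparison-based instead of table-indexed, and it works for arbitrary int values.
-- intended difference: On inputs whose prefix-XOR sequence stays in [-2^20, 2^20) but contains two distinct values congruent mod 2^20 (a negative one and its +2^20 counterpart), A's negative index wraps around the cnt array and merges the two buckets, over-counting; B compares the exact prefix-XOR values, which is the intended count of zero-XOR subarrays. — e.g. on beautifulSubarrays([-1048576]): A returns 1, B returns 0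
import Mathlib
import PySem

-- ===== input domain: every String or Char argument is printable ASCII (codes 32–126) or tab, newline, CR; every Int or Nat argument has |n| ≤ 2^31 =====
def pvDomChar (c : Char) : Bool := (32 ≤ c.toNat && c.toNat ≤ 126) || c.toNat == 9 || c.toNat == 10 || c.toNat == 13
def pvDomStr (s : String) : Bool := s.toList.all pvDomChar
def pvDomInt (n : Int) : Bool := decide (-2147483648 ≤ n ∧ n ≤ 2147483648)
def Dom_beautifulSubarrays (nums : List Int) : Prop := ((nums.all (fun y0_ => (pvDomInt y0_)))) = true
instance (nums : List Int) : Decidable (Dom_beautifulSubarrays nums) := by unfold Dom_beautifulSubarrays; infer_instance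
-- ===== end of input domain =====

-- B re-implements A with a sort-based algorithm: build the prefix-XOR list, sort it so equal
-- values become adjacent, then one run-length scan summing r*(r-1)//2 per run of equal values,
-- instead of A's one-pass accumulation into a fixed 2^20 counting array; on A's accidental
-- negative-index wraparound inputs B returns the intended exact count (see D_ below).

-- ===== PORT A =====
-- Loop body of A's `for i in range(1, n+1)` over state (res, pre_xor, cnt).
-- `pyGetD _ _ 0` is exact wherever Python's indexing does not raise; Pre_ excludes the
-- inputs where Python raises IndexError (a prefix XOR outside [-2^20, 2^20)).

def beautifulSubarrays (nums : List Int) : Int :=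
  let res : Int := 0
  let n : Int := PySem.List.len nums
  let pre_xor : List Int := List.replicate (nums.length + 1) (0 : Int)  -- [0]*(n+1)
  let pre_xor := PySem.List.pySetD pre_xor 0 0                          -- pre_xor[0] = 0
  let cnt : List Int := List.replicate (1 <<< 20) (0 : Int)             -- [0]*(1<<20)
  let cnt := PySem.List.pySetD cnt 0 1                                  -- cnt[0] = 1
  let st := (PySem.List.pyRange 1 (n + 1) 1).foldl
    (fun (st : Int × List Int × List Int) i =>
      let res := st.1
      let pre_xor := st.2.1
      let cnt := st.2.2
      -- pre_xor[i] = pre_xor[i-1] ^ nums[i-1]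
      let v := PySem.Int.bxor (PySem.List.pyGetD pre_xor (i - 1) 0) (PySem.List.pyGetD nums (i - 1) 0)
      let pre_xor := PySem.List.pySetD pre_xor i v
      -- res += cnt[pre_xor[i]]
      let w := PySem.List.pyGetD pre_xor i 0
      let res := res + PySem.List.pyGetD cnt w 0
      -- cnt[pre_xor[i]] += 1
      let cnt := PySem.List.pySetD cnt w (PySem.List.pyGetD cnt w 0 + 1)
      (res, pre_xor, cnt))
    (res, pre_xor, cnt)
  st.1

-- ===== PORT B =====
-- run*(run-1)//2, as B writes it
def pvC2 (n : Int) : Int := PySem.Int.floordiv (n * (n - 1)) 2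

-- Loop body of B's run-length scan over state (total, run, prev); `some p == prev` is
-- Python's `p == prev` with prev possibly None (never equal to an int).
def pvScanStep (st : Int × Int × Option Int) (p : Int) : Int × Int × Option Int :=
  if some p == st.2.2 then (st.1, st.2.1 + 1, st.2.2)
  else (st.1 + pvC2 st.2.1, 1, some p)

def beautifulSubarrays_alt (nums : List Int) : Int :=
  -- Phase 1: prefix = [0]; for x in nums: prefix.append(prefix[-1] ^ x)
  let prefixL := nums.foldl
    (fun acc x => acc ++ [PySem.Int.bxor (PySem.List.pyGetD acc (-1) 0) x]) [(0 : Int)]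
  -- Phase 2: prefix.sort()
  let s := PySem.List.sorted prefixL (fun v => v) false
  -- Phase 3: run-length scan, then the final run's contribution
  let st := s.foldl pvScanStep (0, 0, none)
  st.1 + pvC2 st.2.1

-- ===== PRECONDITION & SPEC =====
-- The sequence of prefix XOR values of nums, starting with a (a = 0 at the call sites).
def pfx (a : Int) : List Int → List Int
  | [] => [a]
  | x :: r => a :: pfx (PySem.Int.bxor a x) r

-- Pre_ excludes exactly the inputs on which A raises IndexError: those whose prefix-XOR
-- sequence leaves [-2^20, 2^20), the index range of A's fixed-size cnt array.
def Pre_beautifulSubarrays (nums : List Int) : Prop :=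
  ∀ p ∈ pfx 0 nums, -1048576 ≤ p ∧ p < 1048576
instance (nums : List Int) : Decidable (Pre_beautifulSubarrays nums) := by
  unfold Pre_beautifulSubarrays; infer_instance
def pvWitness_beautifulSubarrays : List Int := [1, 2, 3]

-- On inputs whose prefix-XOR sequence stays in [-2^20, 2^20) but contains two distinct values
-- congruent mod 2^20, A's negative index wraps around the cnt array and merges the two buckets,
-- over-counting; B compares the exact prefix-XOR values, the intended count of zero-XOR subarrays.
def D_beautifulSubarrays (nums : List Int) : Prop :=
  ∃ p ∈ pfx 0 nums, ∃ q ∈ pfx 0 nums, p ≠ q ∧ p % 1048576 = q % 1048576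
instance (nums : List Int) : Decidable (D_beautifulSubarrays nums) := by
  unfold D_beautifulSubarrays; infer_instance

def Spec_beautifulSubarrays (nums : List Int) (out : Int) : Prop :=
  ¬ D_beautifulSubarrays nums → out = beautifulSubarrays_alt nums
instance (nums : List Int) (out : Int) : Decidable (Spec_beautifulSubarrays nums out) := by
  unfold Spec_beautifulSubarrays; infer_instance

def pvDiffWitness_beautifulSubarrays : List Int := [-1048576]
def pvDiffWitnessOut_beautifulSubarrays : Int × Int := (1, 0)


-- ===== CLAIM (what is proved, stated in full; the proofs are below) =====
def Claim_unchanged_beautifulSubarrays : Prop := ∀ (nums : List Int), Dom_beautifulSubarrays nums → Pre_beautifulSubarrays nums → Spec_beautifulSubarrays nums (beautifulSubarrays nums)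
def Claim_changed_beautifulSubarrays : Prop := Dom_beautifulSubarrays (pvDiffWitness_beautifulSubarrays) ∧ Pre_beautifulSubarrays (pvDiffWitness_beautifulSubarrays) ∧ D_beautifulSubarrays (pvDiffWitness_beautifulSubarrays) ∧ beautifulSubarrays (pvDiffWitness_beautifulSubarrays) = pvDiffWitnessOut_beautifulSubarrays.1 ∧ beautifulSubarrays_alt (pvDiffWitness_beautifulSubarrays) = pvDiffWitnessOut_beautifulSubarrays.2 ∧ pvDiffWitnessOut_beautifulSubarrays.1 ≠ pvDiffWitnessOut_beautifulSubarrays.2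
def Claim_exact_beautifulSubarrays : Prop := ∀ (nums : List Int), Dom_beautifulSubarrays nums → Pre_beautifulSubarrays nums → D_beautifulSubarrays nums → beautifulSubarrays nums ≠ beautifulSubarrays_alt nums


-- ===== LEMMAS AND PROOFS =====

-- Bucket of a value: the physical index its Python list index denotes in A's cnt array.
def bkt (v : Int) : Nat := (v % 1048576).toNat

-- Incremental pair counter: processes the list left to right; each element contributes the
-- number of already-seen elements with the same f-image.
def pairsAux {beta : Type} [DecidableEq beta] (f : Int → beta) : List Int → List Int → Int
  | _, [] => 0
  | seen, x :: r => (seen.countP (fun y => f y == f x) : Int) + pairsAux f (x :: seen) r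

-- One `cnt[v] += 1` step of A.
def cntUpd (c : List Int) (v : Int) : List Int :=
  PySem.List.pySetD c v (PySem.List.pyGetD c v 0 + 1)

theorem bkt_eq_iff (p q : Int) : bkt p = bkt q ↔ p % 1048576 = q % 1048576 := by
  unfold bkt
  have h1 : 0 ≤ p % 1048576 := Int.emod_nonneg _ (by norm_num)
  have h2 : 0 ≤ q % 1048576 := Int.emod_nonneg _ (by norm_num)
  omega

theorem bkt_lt (v : Int) : bkt v < 1048576 := by
  unfold bkt
  have h1 : 0 ≤ v % 1048576 := Int.emod_nonneg _ (by norm_num)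
  have h2 : v % 1048576 < 1048576 := Int.emod_lt_of_pos _ (by norm_num)
  omega

theorem pyGetD_bkt (c : List Int) (h : c.length = 1048576) (v : Int)
    (hv1 : -1048576 ≤ v) (hv2 : v < 1048576) (d : Int) :
    PySem.List.pyGetD c v d = c.getD (bkt v) d := by
  have hbl : bkt v < c.length := by rw [h]; exact bkt_lt v
  by_cases hv : 0 ≤ v
  · have hb : bkt v = v.toNat := by unfold bkt; omega
    rw [PySem.List.pyGetD_eq_getElem c d hv (by omega), hb,
        List.getD_eq_getElem c d (by omega)]
  · have hk0 : 0 < (-v).toNat := by omega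
    have hkl : (-v).toNat ≤ c.length := by omega
    have hget := PySem.List.pyGetD_neg_natCast c (-v).toNat d hk0 hkl
    rw [show -(((-v).toNat : Nat) : Int) = v from by omega] at hget
    rw [hget, List.getD_eq_getElem c d hbl]
    congr 1
    unfold bkt at *
    omega

theorem pySetD_bkt (c : List Int) (h : c.length = 1048576) (v x : Int)
    (hv1 : -1048576 ≤ v) (hv2 : v < 1048576) :
    PySem.List.pySetD c v x = c.set (bkt v) x := by
  by_cases hv : 0 ≤ v
  · rw [PySem.List.pySetD_of_nonneg c x hv]
    congr 1
    unfold bkt; omega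
  · have hb : bkt v = c.length - (-v).toNat := by unfold bkt; omega
    simp only [PySem.List.pySetD, PySem.List.pySet?, PySem.List.pyIdx?, h]
    rw [if_neg (by omega), if_pos (by omega)]
    rw [hb, h]
    rfl

theorem cntUpd_eq (c : List Int) (h : c.length = 1048576) (v : Int)
    (hv1 : -1048576 ≤ v) (hv2 : v < 1048576) :
    cntUpd c v = c.set (bkt v) (c.getD (bkt v) 0 + 1) := by
  unfold cntUpd
  rw [pyGetD_bkt c h v hv1 hv2, pySetD_bkt c h v _ hv1 hv2]

theorem getD_set_self (c : List Int) (i : Nat) (h : i < c.length) (v : Int) :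
    (c.set i v).getD i 0 = v := by
  simp [List.getD, h]

theorem getD_set_ne (c : List Int) (i j : Nat) (h : i ≠ j) (v : Int) :
    (c.set i v).getD j 0 = c.getD j 0 := by
  simp [List.getD, List.getElem?_set_ne h]

theorem cntFold_getD (ps : List Int) : ∀ c : List Int, c.length = 1048576 →
    (∀ p ∈ ps, -1048576 ≤ p ∧ p < 1048576) →
    ∀ v : Int, -1048576 ≤ v → v < 1048576 →
    PySem.List.pyGetD (ps.foldl cntUpd c) v 0
      = c.getD (bkt v) 0 + (ps.countP (fun p => bkt p == bkt v) : Int) := by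
  induction ps with
  | nil =>
    intro c hc _ v hv1 hv2
    simp [pyGetD_bkt c hc v hv1 hv2]
  | cons p ps ih =>
    intro c hc hmem v hv1 hv2
    have hp := hmem p (by simp)
    have hc' : (cntUpd c p).length = 1048576 := by
      unfold cntUpd; rw [PySem.List.length_pySetD]; exact hc
    rw [List.foldl_cons, ih (cntUpd c p) hc' (fun q hq => hmem q (by simp [hq])) v hv1 hv2]
    rw [cntUpd_eq c hc p hp.1 hp.2]
    by_cases hb : bkt p = bkt v
    · rw [hb, getD_set_self c (bkt v) (by rw [hc]; exact bkt_lt v) _]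
      simp [hb]
      omega
    · rw [getD_set_ne c _ _ hb]
      simp [hb]

theorem pfx_length (l : List Int) : ∀ a : Int, (pfx a l).length = l.length + 1 := by
  induction l with
  | nil => intro a; rfl
  | cons x r ih => intro a; simp [pfx, ih]

theorem pfx_getElem_zero (l : List Int) (a : Int) :
    (pfx a l)[0]'(by rw [pfx_length]; omega) = a := by
  cases l <;> rfl

theorem pfx_succ (l : List Int) : ∀ (a : Int) (k : Nat) (hk : k < l.length),
    (pfx a l)[k+1]'(by rw [pfx_length]; omega)
      = PySem.Int.bxor ((pfx a l)[k]'(by rw [pfx_length]; omega)) (l[k]'hk) := by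
  induction l with
  | nil => intro a k hk; simp at hk
  | cons x r ih =>
    intro a k hk
    cases k with
    | zero =>
      simpa only [pfx, List.getElem_cons_succ, List.getElem_cons_zero] using
        pfx_getElem_zero r (PySem.Int.bxor a x)
    | succ j =>
      have hj : j < r.length := by simpa using hk
      simpa only [pfx, List.getElem_cons_succ] using ih (PySem.Int.bxor a x) j hj

theorem pairsAux_append {beta : Type} [DecidableEq beta] (f : Int → beta) (l : List Int) :
    ∀ (seen r : List Int),
      pairsAux f seen (l ++ r) = pairsAux f seen l + pairsAux f (l.reverse ++ seen) r := by
  induction l with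
  | nil => intro seen r; simp [pairsAux]
  | cons x l ih =>
    intro seen r
    show (↑(seen.countP _) : Int) + pairsAux f (x :: seen) (l ++ r) = _
    rw [ih (x :: seen) r]
    have hs : l.reverse ++ (x :: seen) = (x :: l).reverse ++ seen := by simp
    rw [hs]
    show _ = (↑(seen.countP _) : Int) + pairsAux f (x :: seen) l + _
    ring

theorem pairsAux_concat {beta : Type} [DecidableEq beta] (f : Int → beta) (l : List Int) (x : Int) :
    pairsAux f [] (l ++ [x]) = pairsAux f [] l + (l.countP (fun y => f y == f x) : Int) := by
  rw [pairsAux_append f l [] [x]]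
  show _ = _
  simp [pairsAux, List.countP_reverse]

theorem prefixFold (r : List Int) : ∀ (l : List Int) (a : Int),
    r.foldl (fun acc x => acc ++ [PySem.Int.bxor (PySem.List.pyGetD acc (-1) 0) x]) (l ++ [a])
      = l ++ pfx a r := by
  induction r with
  | nil => intro l a; simp [pfx]
  | cons x r ih =>
    intro l a
    rw [List.foldl_cons, PySem.List.pyGetD_neg_one_append_singleton]
    rw [ih (l ++ [a]) (PySem.Int.bxor a x)]
    simp [pfx]

-- pairsAux depends on `seen` only through its multiset.
theorem pairsAux_congr_seen {beta : Type} [DecidableEq beta] (f : Int → beta) :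
    ∀ (l seen seen' : List Int), seen.Perm seen' → pairsAux f seen l = pairsAux f seen' l := by
  intro l
  induction l with
  | nil => intro _ _ _; rfl
  | cons x r ih =>
    intro seen seen' hp
    show (↑(seen.countP _) : Int) + pairsAux f (x :: seen) r
        = (↑(seen'.countP _) : Int) + pairsAux f (x :: seen') r
    rw [hp.countP_eq, ih (x :: seen) (x :: seen') (hp.cons x)]

-- The total pair count is invariant under permutation of the processed list.
theorem pairsAux_perm {beta : Type} [DecidableEq beta] (f : Int → beta) :
    ∀ {l l' : List Int}, l.Perm l' → ∀ seen, pairsAux f seen l = pairsAux f seen l' := by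
  intro l l' hp
  induction hp with
  | nil => intro _; rfl
  | cons x _ ih =>
    intro seen
    show (↑(seen.countP _) : Int) + pairsAux f (x :: seen) _
        = (↑(seen.countP _) : Int) + pairsAux f (x :: seen) _
    rw [ih (x :: seen)]
  | swap a b l =>
    intro seen
    show (↑(seen.countP (fun y => f y == f b)) : Int)
          + ((↑((b :: seen).countP (fun y => f y == f a)) : Int) + pairsAux f (a :: b :: seen) l)
        = (↑(seen.countP (fun y => f y == f a)) : Int)
          + ((↑((a :: seen).countP (fun y => f y == f b)) : Int) + pairsAux f (b :: a :: seen) l)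
    rw [pairsAux_congr_seen f l (a :: b :: seen) (b :: a :: seen) (List.Perm.swap b a seen)]
    simp only [List.countP_cons]
    by_cases h : f a = f b
    · simp only [h]
    · have h' : f b ≠ f a := fun e => h e.symm
      have e1 : (f a == f b) = false := beq_eq_false_iff_ne.mpr h
      have e2 : (f b == f a) = false := beq_eq_false_iff_ne.mpr h'
      simp only [e1, e2, Bool.false_eq_true, if_false]
      push_cast
      ring
  | trans _ _ ih1 ih2 => intro seen; rw [ih1 seen, ih2 seen]

-- Elements of `seen` whose image never occurs in the rest of the list are irrelevant.
theorem pairsAux_drop_seen {beta : Type} [DecidableEq beta] (f : Int → beta) :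
    ∀ (l s1 s2 : List Int), (∀ z ∈ l, ∀ w ∈ s1, f z ≠ f w) →
      pairsAux f (s1 ++ s2) l = pairsAux f s2 l := by
  intro l
  induction l with
  | nil => intro _ _ _; rfl
  | cons z r ih =>
    intro s1 s2 h
    show (↑((s1 ++ s2).countP (fun y => f y == f z)) : Int) + pairsAux f (z :: (s1 ++ s2)) r
        = (↑(s2.countP (fun y => f y == f z)) : Int) + pairsAux f (z :: s2) r
    have hc1 : s1.countP (fun y => f y == f z) = 0 := by
      rw [List.countP_eq_zero]
      intro w hw
      simpa using (h z (by simp) w hw).symm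
    rw [List.countP_append, hc1, Nat.zero_add]
    rw [pairsAux_congr_seen f r (z :: (s1 ++ s2)) (s1 ++ (z :: s2)) List.perm_middle.symm,
        ih s1 (z :: s2) (fun y hy => h y (by simp [hy]))]

theorem c2_step (n : Int) : pvC2 (n + 1) = pvC2 n + n := by
  unfold pvC2
  rw [PySem.Int.floordiv_eq_ediv_of_pos (by norm_num),
      PySem.Int.floordiv_eq_ediv_of_pos (by norm_num)]
  rw [show (n + 1) * ((n + 1) - 1) = n * (n - 1) + n * 2 from by ring]
  rw [Int.add_mul_ediv_right _ _ (by norm_num)]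

-- Pair count of a sorted tail whose elements are all ≥ x, started with m copies of x seen.
theorem pairsAux_run (x : Int) : ∀ l : List Int, l.Pairwise (· ≤ ·) → (∀ y ∈ l, x ≤ y) →
    ∀ m : Nat,
    pairsAux (fun v : Int => v) (List.replicate m x) l
      = pvC2 ((m : Int) + (l.count x : Int)) - pvC2 (m : Int)
        + pairsAux (fun v : Int => v) [] (l.filter (· ≠ x)) := by
  intro l
  induction l with
  | nil => intro _ _ m; simp [pairsAux]
  | cons y l ih =>
    intro hpw hge m
    have hpl := (List.pairwise_cons.mp hpw).2
    have hy : ∀ z ∈ l, y ≤ z := (List.pairwise_cons.mp hpw).1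
    by_cases hxy : y = x
    · subst hxy
      show (↑((List.replicate m y).countP (fun z => z == y)) : Int)
            + pairsAux (fun v : Int => v) (y :: List.replicate m y) l = _
      rw [List.countP_replicate]
      rw [show (y :: List.replicate m y) = List.replicate (m + 1) y from List.replicate_succ.symm]
      rw [ih hpl (fun z hz => hge z (by simp [hz])) (m + 1)]
      have hcnt : (y :: l).count y = l.count y + 1 := List.count_cons_self
      have hfil : (y :: l).filter (· ≠ y) = l.filter (· ≠ y) := by simp
      rw [hcnt, hfil]
      have hstep := c2_step ((m : Int) + (l.count y : Int))
      have hstep2 := c2_step (m : Int)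
      simp only [beq_self_eq_true, if_pos]
      push_cast
      ring_nf
      ring_nf at hstep hstep2
      omega
    · have hxlty : x < y := lt_of_le_of_ne (hge y (by simp)) (fun h => hxy h.symm)
      show (↑((List.replicate m x).countP (fun z => z == y)) : Int)
            + pairsAux (fun v : Int => v) (y :: List.replicate m x) l = _
      rw [List.countP_replicate]
      have hxny : (x == y) = false := by simp [ne_of_lt hxlty]
      rw [hxny]
      have hdrop : pairsAux (fun v : Int => v) (y :: List.replicate m x) l
          = pairsAux (fun v : Int => v) [y] l := by
        rw [pairsAux_congr_seen (fun v : Int => v) l (y :: List.replicate m x)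
              (List.replicate m x ++ [y]) (List.perm_append_singleton y (List.replicate m x)).symm]
        exact pairsAux_drop_seen (fun v : Int => v) l (List.replicate m x) [y]
          (fun z hz w hw => by
            have hw' : w = x := List.eq_of_mem_replicate hw
            have : y ≤ z := hy z hz
            simp only [hw']
            omega)
      have hcnt0 : (y :: l).count x = 0 := by
        rw [List.count_eq_zero]
        intro hmem
        rcases List.mem_cons.mp hmem with h | h
        · exact absurd h (ne_of_lt hxlty)
        · have := hy x h; omega
      have hfil : (y :: l).filter (· ≠ x) = y :: l := by
        apply List.filter_eq_self.mpr
        intro z hz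
        rcases List.mem_cons.mp hz with rfl | h
        · simp [ne_of_gt hxlty]
        · have := hy z h
          simp only [decide_eq_true_eq]
          omega
      rw [hdrop, hcnt0, hfil]
      have hpairs : pairsAux (fun v : Int => v) [] (y :: l)
          = pairsAux (fun v : Int => v) [y] l := by
        show (↑(List.countP _ []) : Int) + _ = _
        simp [List.countP_nil]
      rw [hpairs]
      simp

-- Peel the leading run: pair count of a sorted list with head x.
theorem pairsAux_head (x : Int) (l : List Int) (hpw : l.Pairwise (· ≤ ·))
    (hge : ∀ y ∈ l, x ≤ y) :
    pairsAux (fun v : Int => v) [] (x :: l)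
      = pvC2 (1 + (l.count x : Int)) + pairsAux (fun v : Int => v) [] (l.filter (· ≠ x)) := by
  show (↑(List.countP _ []) : Int) + pairsAux (fun v : Int => v) [x] l = _
  rw [show [x] = List.replicate 1 x from rfl, pairsAux_run x l hpw hge 1]
  have h1 : pvC2 (1 : Int) = 0 := by decide
  simp [List.countP_nil, h1]

-- The run-length scan, started inside a run of value a with current length r.
theorem runLoop : ∀ (l : List Int), l.Pairwise (· ≤ ·) → ∀ a : Int, (∀ y ∈ l, a ≤ y) →
    ∀ t r : Int,
    (l.foldl pvScanStep (t, r, some a)).1 + pvC2 (l.foldl pvScanStep (t, r, some a)).2.1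
      = t + pvC2 (r + (l.count a : Int)) + pairsAux (fun v : Int => v) [] (l.filter (· ≠ a)) := by
  intro l
  induction l with
  | nil => intro _ a _ t r; simp [pairsAux]
  | cons x l ih =>
    intro hpw a hge t r
    have hpl := (List.pairwise_cons.mp hpw).2
    have hx : ∀ z ∈ l, x ≤ z := (List.pairwise_cons.mp hpw).1
    rw [List.foldl_cons]
    by_cases hxa : x = a
    · subst hxa
      have hstep : pvScanStep (t, r, some x) x = (t, r + 1, some x) := by
        simp [pvScanStep]
      rw [hstep, ih hpl x hx t (r + 1)]
      have hcnt : (x :: l).count x = l.count x + 1 := List.count_cons_self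
      have hfil : (x :: l).filter (· ≠ x) = l.filter (· ≠ x) := by simp
      rw [hcnt, hfil]
      push_cast
      ring_nf
    · have hax : a < x := lt_of_le_of_ne (hge x (by simp)) (fun h => hxa h.symm)
      have hstep : pvScanStep (t, r, some a) x = (t + pvC2 r, 1, some x) := by
        simp [pvScanStep, hxa]
      rw [hstep, ih hpl x hx (t + pvC2 r) 1]
      have hcnt0 : (x :: l).count a = 0 := by
        rw [List.count_eq_zero]
        intro hmem
        rcases List.mem_cons.mp hmem with h | h
        · exact absurd h (ne_of_lt hax)
        · have := hx a h; omega
      have hfil : (x :: l).filter (· ≠ a) = x :: l := by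
        apply List.filter_eq_self.mpr
        intro z hz
        rcases List.mem_cons.mp hz with rfl | h
        · simp [ne_of_gt hax]
        · have h1 := hx z h
          simp only [decide_eq_true_eq]
          omega
      rw [hcnt0, hfil, pairsAux_head x l hpl hx]
      push_cast
      ring

-- The whole scan over a sorted list computes the pair count.
theorem runScan_eq (s : List Int) (hpw : s.Pairwise (· ≤ ·)) :
    (s.foldl pvScanStep (0, 0, none)).1 + pvC2 (s.foldl pvScanStep (0, 0, none)).2.1
      = pairsAux (fun v : Int => v) [] s := by
  cases s with
  | nil => decide
  | cons x s' =>
    have hpl := (List.pairwise_cons.mp hpw).2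
    have hx : ∀ z ∈ s', x ≤ z := (List.pairwise_cons.mp hpw).1
    rw [List.foldl_cons]
    have hstep : pvScanStep (0, 0, none) x = (0 + pvC2 0, 1, some x) := by
      simp [pvScanStep]
    rw [hstep, runLoop s' hpl x hx (0 + pvC2 0) 1, pairsAux_head x s' hpl hx]
    have h0 : pvC2 (0 : Int) = 0 := by decide
    rw [h0]
    ring

theorem B_eq (nums : List Int) :
    beautifulSubarrays_alt nums = pairsAux (fun v : Int => v) [] (pfx 0 nums) := by
  unfold beautifulSubarrays_alt
  dsimp only
  rw [show [(0:Int)] = [] ++ [(0:Int)] from rfl, prefixFold nums [] 0, List.nil_append]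
  rw [runScan_eq _ (PySem.List.sorted_pairwise (pfx 0 nums) (fun v => v))]
  exact pairsAux_perm (fun v : Int => v)
    (PySem.List.sorted_perm (pfx 0 nums) (fun v => v) false) []

theorem pfx_take_one (a : Int) (l : List Int) : (pfx a l).take 1 = [a] := by
  cases l <;> rfl

theorem repl_getD0 : ∀ (n i : Nat), (List.replicate n (0 : Int)).getD i 0 = 0 := by
  intro n
  induction n with
  | zero => intro i; rfl
  | succ k ih =>
    intro i
    rw [List.replicate_succ]
    cases i with
    | zero => rfl
    | succ j => exact ih j

theorem loopA (nums : List Int)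
    (hpre : ∀ p ∈ pfx 0 nums, -1048576 ≤ p ∧ p < 1048576) :
    ∀ m : Nat, m ≤ nums.length →
    (PySem.List.pyRange 1 ((m : Int) + 1) 1).foldl
      (fun (st : Int × List Int × List Int) i =>
        let res := st.1
        let pre_xor := st.2.1
        let cnt := st.2.2
        let v := PySem.Int.bxor (PySem.List.pyGetD pre_xor (i - 1) 0) (PySem.List.pyGetD nums (i - 1) 0)
        let pre_xor := PySem.List.pySetD pre_xor i v
        let w := PySem.List.pyGetD pre_xor i 0
        let res := res + PySem.List.pyGetD cnt w 0
        let cnt := PySem.List.pySetD cnt w (PySem.List.pyGetD cnt w 0 + 1)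
        (res, pre_xor, cnt))
      (0, PySem.List.pySetD (List.replicate (nums.length + 1) (0 : Int)) 0 0,
          PySem.List.pySetD (List.replicate (1 <<< 20) (0 : Int)) 0 1)
    = (pairsAux bkt [] ((pfx 0 nums).take (m + 1)),
       (pfx 0 nums).take (m + 1) ++ List.replicate (nums.length - m) (0 : Int),
       ((pfx 0 nums).take (m + 1)).foldl cntUpd (List.replicate (1 <<< 20) (0 : Int))) := by
  have hN : (1 <<< 20 : Nat) = 1048576 := by decide
  have hPlen : (pfx 0 nums).length = nums.length + 1 := pfx_length nums 0
  intro m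
  induction m with
  | zero =>
    intro _
    conv_lhs => rw [show ((0 : Nat) : Int) + 1 = 1 from by norm_num,
        PySem.List.pyRange_one_eq_nil le_rfl, List.foldl_nil]
    simp only [Prod.mk.injEq]
    refine ⟨?_, ?_, ?_⟩
    · simp [pfx_take_one, pairsAux]
    · rw [pfx_take_one, PySem.List.pySetD_of_nonneg _ _ le_rfl, List.replicate_succ]
      simp
    · have h3 : cntUpd (List.replicate (1 <<< 20) (0 : Int)) 0
          = PySem.List.pySetD (List.replicate (1 <<< 20) (0 : Int)) 0 1 := by
        unfold cntUpd
        rw [PySem.List.pyGetD_zero, repl_getD0, show ((0 : Int) + 1) = 1 from by norm_num]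
      conv_rhs => rw [pfx_take_one, List.foldl_cons, List.foldl_nil, h3]
  | succ m ih =>
    intro hm
    have hmn : m < nums.length := by omega
    have hm1 : m + 1 < (pfx 0 nums).length := by omega
    rw [show ((m + 1 : Nat) : Int) + 1 = (((m : Int) + 1) + 1) from by push_cast; ring,
        PySem.List.pyRange_one_succ_right (by omega), List.foldl_append, ih (by omega),
        List.foldl_cons, List.foldl_nil]
    dsimp only
    rw [show ((m : Int) + 1) - 1 = (m : Int) from by ring]
    have hA1get : PySem.List.pyGetD ((pfx 0 nums).take (m + 1) ++ List.replicate (nums.length - m) (0 : Int)) ((m : Int)) 0 = (pfx 0 nums)[m]'(by omega) := by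
      rw [PySem.List.pyGetD_natCast, List.getD_eq_getElem _ _ (by simp; omega),
          List.getElem_append_left (by simp; omega)]
      simp
    have hnumsget : PySem.List.pyGetD nums ((m : Int)) 0 = nums[m]'hmn := by
      rw [PySem.List.pyGetD_natCast, List.getD_eq_getElem _ _ hmn]
    rw [hA1get, hnumsget, ← pfx_succ nums 0 m hmn]
    rw [show ((m : Int) + 1) = ((m + 1 : Nat) : Int) from by push_cast; ring]
    rw [PySem.List.pySetD_natCast]
    have hset : ((pfx 0 nums).take (m + 1) ++ List.replicate (nums.length - m) (0 : Int)).set (m + 1) ((pfx 0 nums)[m+1]'hm1)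
        = (pfx 0 nums).take (m + 1 + 1) ++ List.replicate (nums.length - (m + 1)) (0 : Int) := by
      have hTlen : ((pfx 0 nums).take (m + 1)).length = m + 1 := by
        simp; omega
      rw [show nums.length - m = (nums.length - (m + 1)) + 1 from by omega,
          List.replicate_succ,
          List.set_append_right (m + 1) _ (by omega),
          hTlen, Nat.sub_self, List.set_cons_zero,
          List.take_succ_eq_append_getElem hm1, List.append_assoc]
      rfl
    rw [hset]
    have hw : PySem.List.pyGetD ((pfx 0 nums).take (m + 1 + 1) ++ List.replicate (nums.length - (m + 1)) (0 : Int)) (((m + 1 : Nat) : Int)) 0 = (pfx 0 nums)[m+1]'hm1 := by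
      rw [PySem.List.pyGetD_natCast, List.getD_eq_getElem _ _ (by simp; omega),
          List.getElem_append_left (by simp; omega)]
      simp
    rw [hw]
    have hmemtake : ∀ p ∈ (pfx 0 nums).take (m + 1), -1048576 ≤ p ∧ p < 1048576 :=
      fun p hp => hpre p (List.mem_of_mem_take hp)
    have hvmem := hpre ((pfx 0 nums)[m+1]'hm1) (List.getElem_mem hm1)
    have hclen : (List.replicate (1 <<< 20) (0 : Int)).length = 1048576 := by
      rw [List.length_replicate]; exact hN
    have hcget : PySem.List.pyGetD (((pfx 0 nums).take (m + 1)).foldl cntUpd (List.replicate (1 <<< 20) (0 : Int))) ((pfx 0 nums)[m+1]'hm1) 0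
        = (((pfx 0 nums).take (m + 1)).countP (fun p => bkt p == bkt ((pfx 0 nums)[m+1]'hm1)) : Int) := by
      rw [cntFold_getD _ _ hclen hmemtake _ hvmem.1 hvmem.2]
      rw [repl_getD0]
      ring
    rw [hcget]
    simp only [Prod.mk.injEq]
    refine ⟨?_, by trivial, ?_⟩
    · rw [List.take_succ_eq_append_getElem hm1, pairsAux_concat]
    · rw [List.take_succ_eq_append_getElem hm1, List.foldl_append, List.foldl_cons, List.foldl_nil,
          ← hcget]
      rfl

theorem A_eq (nums : List Int)
    (hpre : ∀ p ∈ pfx 0 nums, -1048576 ≤ p ∧ p < 1048576) :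
    beautifulSubarrays nums = pairsAux bkt [] (pfx 0 nums) := by
  unfold beautifulSubarrays
  dsimp only
  rw [PySem.List.len_eq, loopA nums hpre nums.length le_rfl]
  dsimp only
  rw [List.take_of_length_le (by rw [pfx_length])]

theorem pairs_congr_aux :
    ∀ (rest seen : List Int),
      (∀ p, (p ∈ seen ∨ p ∈ rest) → ∀ q, (q ∈ seen ∨ q ∈ rest) → bkt p = bkt q → p = q) →
      pairsAux bkt seen rest = pairsAux (fun v : Int => v) seen rest := by
  intro rest
  induction rest with
  | nil => intro seen _; rfl
  | cons x r ih =>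
    intro seen h
    show (↑(seen.countP fun y => bkt y == bkt x) : Int) + pairsAux bkt (x :: seen) r
        = (↑(seen.countP fun y => y == x) : Int) + pairsAux (fun v : Int => v) (x :: seen) r
    have hcnt : (seen.countP fun y => bkt y == bkt x) = (seen.countP fun y => y == x) := by
      apply List.countP_congr
      intro y hy
      by_cases hyx : y = x
      · subst hyx; simp
      · have hb : bkt y ≠ bkt x :=
          fun hbk => hyx (h y (Or.inl hy) x (Or.inr (by simp)) hbk)
        simp [hyx, hb]
    rw [hcnt, ih (x :: seen) (by
      intro p hp q hq hbk
      apply h p ?_ q ?_ hbk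
      · rcases hp with hp | hp
        · rcases List.mem_cons.mp hp with rfl | hp
          · exact Or.inr (by simp)
          · exact Or.inl hp
        · exact Or.inr (by simp [hp])
      · rcases hq with hq | hq
        · rcases List.mem_cons.mp hq with rfl | hq
          · exact Or.inr (by simp)
          · exact Or.inl hq
        · exact Or.inr (by simp [hq]))]

theorem pairs_mono :
    ∀ (rest seen : List Int), pairsAux (fun v : Int => v) seen rest ≤ pairsAux bkt seen rest := by
  intro rest
  induction rest with
  | nil => intro seen; exact le_rfl
  | cons x r ih =>
    intro seen
    show (↑(seen.countP fun y => y == x) : Int) + pairsAux (fun v : Int => v) (x :: seen) r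
        ≤ (↑(seen.countP fun y => bkt y == bkt x) : Int) + pairsAux bkt (x :: seen) r
    have hc : (seen.countP fun y => y == x) ≤ (seen.countP fun y => bkt y == bkt x) := by
      apply List.countP_mono_left
      intro y _ hbeq
      have : y = x := by simpa using hbeq
      subst this; simp
    exact add_le_add (by exact_mod_cast hc) (ih (x :: seen))

theorem countP_strict (p q : Int → Bool) (hpq : ∀ z, q z = true → p z = true) :
    ∀ (l : List Int) (x : Int), x ∈ l → p x = true → q x = false →
      l.countP q < l.countP p := by
  intro l
  induction l with
  | nil => intro x hx; simp at hx
  | cons y r ih =>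
    intro x hx hp hq
    rcases List.mem_cons.mp hx with rfl | hxr
    · have hle : r.countP q ≤ r.countP p := List.countP_mono_left (fun z _ => hpq z)
      simp [List.countP_cons, hq, hp]
      omega
    · have := ih x hxr hp hq
      simp only [List.countP_cons]
      by_cases hqy : q y = true
      · have hpy := hpq y hqy
        simp [hqy, hpy]
        omega
      · simp only [Bool.not_eq_true] at hqy
        simp [hqy]
        split <;> omega

theorem pairs_strict (u v : List Int) (x y : Int) (hxu : x ∈ u) (hxy : x ≠ y)
    (hb : bkt x = bkt y) :
    pairsAux (fun v : Int => v) [] (u ++ y :: v) < pairsAux bkt [] (u ++ y :: v) := by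
  rw [pairsAux_append, pairsAux_append]
  have h1 : pairsAux (fun v : Int => v) [] u ≤ pairsAux bkt [] u := pairs_mono u []
  have h2 : ((u.reverse ++ []).countP fun z => z == y)
      < ((u.reverse ++ []).countP fun z => bkt z == bkt y) := by
    apply countP_strict _ _ (fun z hz => by
      have : z = y := by simpa using hz
      subst this; simp) _ x (by simp [hxu]) (by simp [hb]) (by simp [hxy])
  have h3 : pairsAux (fun v : Int => v) (y :: (u.reverse ++ [])) v
      ≤ pairsAux bkt (y :: (u.reverse ++ [])) v := pairs_mono v _
  have h2' : (↑((u.reverse ++ []).countP fun z => z == y) : Int)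
      < ↑((u.reverse ++ []).countP fun z => bkt z == bkt y) := by exact_mod_cast h2
  show pairsAux _ [] u + ((↑((u.reverse ++ []).countP fun z => z == y) : Int)
      + pairsAux _ (y :: (u.reverse ++ [])) v) < pairsAux bkt [] u
      + ((↑((u.reverse ++ []).countP fun z => bkt z == bkt y) : Int)
      + pairsAux bkt (y :: (u.reverse ++ [])) v)
  linarith

theorem two_mem_split {a b : Int} (l : List Int) (ha : a ∈ l) (hb : b ∈ l) (hab : a ≠ b) :
    ∃ u x y v, l = u ++ y :: v ∧ x ∈ u ∧ x ≠ y ∧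
      ((x = a ∧ y = b) ∨ (x = b ∧ y = a)) := by
  obtain ⟨u, v, rfl⟩ := List.append_of_mem hb
  by_cases hau : a ∈ u
  · exact ⟨u, a, b, v, rfl, hau, hab, Or.inl ⟨rfl, rfl⟩⟩
  · have hav : a ∈ v := by
      rcases List.mem_append.mp ha with h | h
      · exact absurd h hau
      · rcases List.mem_cons.mp h with h | h
        · exact absurd h hab
        · exact h
    obtain ⟨u2, v2, rfl⟩ := List.append_of_mem hav
    exact ⟨u ++ b :: u2, b, a, v2, by simp, by simp, fun h => hab h.symm, Or.inr ⟨rfl, rfl⟩⟩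

-- ===== VERDICT (by name: the statement is the Claim_ definition above) =====
theorem beautifulSubarrays_spec : Claim_unchanged_beautifulSubarrays := by
  intro nums _ hpre
  unfold Spec_beautifulSubarrays
  intro hD
  rw [A_eq nums hpre, B_eq]
  apply pairs_congr_aux (pfx 0 nums) []
  intro p hp q hq hbk
  have hp' : p ∈ pfx 0 nums := hp.resolve_left (by simp)
  have hq' : q ∈ pfx 0 nums := hq.resolve_left (by simp)
  by_contra hne
  exact hD ⟨p, hp', q, hq', hne, (bkt_eq_iff p q).mp hbk⟩

theorem beautifulSubarrays_changed : Claim_changed_beautifulSubarrays := by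
  unfold Claim_changed_beautifulSubarrays
  refine ⟨by decide, by decide, by decide, ?_, by decide, by decide⟩
  show beautifulSubarrays [-1048576] = (1 : Int)
  rw [A_eq [-1048576] (by decide)]
  decide

theorem beautifulSubarrays_tight : Claim_exact_beautifulSubarrays := by
  intro nums _ hpre hD
  rw [A_eq nums hpre, B_eq]
  obtain ⟨p, hp, q, hq, hne, hmod⟩ := hD
  have hbk : bkt p = bkt q := (bkt_eq_iff p q).mpr hmod
  obtain ⟨u, x, y, v, hl, hxu, hxy, hcase⟩ := two_mem_split (pfx 0 nums) hp hq hne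
  have hbxy : bkt x = bkt y := by
    rcases hcase with ⟨rfl, rfl⟩ | ⟨rfl, rfl⟩
    · exact hbk
    · exact hbk.symm
  rw [hl]
  exact (pairs_strict u v x y hxu hxy hbxy).ne'
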